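-- pv_equiv track=rewrite | github.com/sanjay51318/Final_BenchSync | utils/resume_analyzer_interface.py | _infer_roles_from_skills
-- ===== SOURCE A (Python) =====
-- def _infer_roles_from_skills(skills: list) -> list:
--     """Infer possible roles based on skills"""
--     skills_lower = [skill.lower() for skill in skills]
--     roles = []
--
--     if any(skill in skills_lower for skill in ['react', 'angular', 'vue.js', 'html', 'css', 'javascript']):
--         roles.append('Frontend Developer')
--
--     if any(skill in skills_lower for skill in ['python', 'java', 'node.js', 'sql', 'postgresql']):
--         roles.append('Backend Developer')
--
--     if any(skill in skills_lower for skill in ['react', 'angular']) and any(skill in skills_lower for skill in ['python', 'java', 'node.js']):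
--         roles.append('Full Stack Developer')
--
--     if any(skill in skills_lower for skill in ['aws', 'azure', 'docker', 'kubernetes', 'jenkins']):
--         roles.append('DevOps Engineer')
--
--     if any(skill in skills_lower for skill in ['machine learning', 'ai', 'tensorflow', 'pytorch']):
--         roles.append('Data Scientist')
--
--     return roles if roles else ['Software Developer']
-- ===== SOURCE B (Python) =====
-- ROLE_RULES = [
--     ('Frontend Developer', [['react', 'angular', 'vue.js', 'html', 'css', 'javascript']]),
--     ('Backend Developer', [['python', 'java', 'node.js', 'sql', 'postgresql']]),
--     ('Full Stack Developer', [['react', 'angular'], ['python', 'java', 'node.js']]),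
--     ('DevOps Engineer', [['aws', 'azure', 'docker', 'kubernetes', 'jenkins']]),
--     ('Data Scientist', [['machine learning', 'ai', 'tensorflow', 'pytorch']]),
-- ]
--
--
-- def _build_index():
--     """Invert the rules: keyword -> list of (role, group-id) pairs it satisfies."""
--     index = {}
--     for role, groups in ROLE_RULES:
--         for gid, group in enumerate(groups):
--             for kw in group:
--                 index.setdefault(kw, []).append((role, gid))
--     return index
--
--
-- INDEX = _build_index()
--
--
-- def _infer_roles_from_skills(skills: list) -> list:
--     """Infer possible roles by a single pass over the skills through the inverted index."""
--     satisfied = set()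
--     for skill in skills:
--         satisfied.update(INDEX.get(skill.lower(), ()))
--     roles = [role for role, groups in ROLE_RULES
--              if all((role, gid) in satisfied for gid in range(len(groups)))]
--     return roles or ['Software Developer']
-- ===== Notes on version B (the rewrite author's own statement) =====
-- stated objective: alternative
-- what changed: B inverts the traversal: it precomputes a keyword -> (role, group-id) index from the rules, makes a single pass over the skills collecting the satisfied (role, group) pairs into a set, and then emits each role whose groups are all satisfied, instead of A's five per-role membership scans of the lowered skill list.
import Mathlib
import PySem

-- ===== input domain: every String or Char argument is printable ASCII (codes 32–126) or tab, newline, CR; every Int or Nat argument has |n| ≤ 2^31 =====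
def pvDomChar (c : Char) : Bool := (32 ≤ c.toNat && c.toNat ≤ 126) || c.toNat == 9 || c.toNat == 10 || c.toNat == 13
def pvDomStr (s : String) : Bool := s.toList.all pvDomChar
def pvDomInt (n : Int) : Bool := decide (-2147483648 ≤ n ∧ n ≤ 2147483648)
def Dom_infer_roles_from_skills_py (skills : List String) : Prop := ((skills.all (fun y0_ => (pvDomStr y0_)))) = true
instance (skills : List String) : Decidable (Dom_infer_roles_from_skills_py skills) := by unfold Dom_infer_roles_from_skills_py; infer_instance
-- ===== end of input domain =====

-- B inverts A's per-role scans into a keyword → (role, group) index consulted once per skill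
-- in a single pass; objective: alternative (different traversal, same observable result).

-- ===== PORT A =====
def infer_roles_from_skills_py (skills : List String) : List String :=
  let skills_lower := skills.map PySem.Str.lower
  let roles : List String := []
  let roles := if ["react", "angular", "vue.js", "html", "css", "javascript"].any
      (fun skill => skills_lower.contains skill) then roles ++ ["Frontend Developer"] else roles
  let roles := if ["python", "java", "node.js", "sql", "postgresql"].any
      (fun skill => skills_lower.contains skill) then roles ++ ["Backend Developer"] else roles
  let roles := if (["react", "angular"].any (fun skill => skills_lower.contains skill)
      && ["python", "java", "node.js"].any (fun skill => skills_lower.contains skill))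
      then roles ++ ["Full Stack Developer"] else roles
  let roles := if ["aws", "azure", "docker", "kubernetes", "jenkins"].any
      (fun skill => skills_lower.contains skill) then roles ++ ["DevOps Engineer"] else roles
  let roles := if ["machine learning", "ai", "tensorflow", "pytorch"].any
      (fun skill => skills_lower.contains skill) then roles ++ ["Data Scientist"] else roles
  if roles ≠ [] then roles else ["Software Developer"]

-- ===== PORT B =====
def pvRules : List (String × List (List String)) :=
  [("Frontend Developer", [["react", "angular", "vue.js", "html", "css", "javascript"]]),
   ("Backend Developer", [["python", "java", "node.js", "sql", "postgresql"]]),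
   ("Full Stack Developer", [["react", "angular"], ["python", "java", "node.js"]]),
   ("DevOps Engineer", [["aws", "azure", "docker", "kubernetes", "jenkins"]]),
   ("Data Scientist", [["machine learning", "ai", "tensorflow", "pytorch"]])]

-- Source B's _build_index(): keyword → list of (role, group-id) pairs, built from the rules
def pvIndex : PySem.Dict String (List (String × Int)) :=
  pvRules.foldl (fun idx r =>
    (PySem.List.enumerate r.2 0).foldl (fun idx gg =>
      gg.2.foldl (fun idx kw =>
        PySem.Dict.insert idx kw (PySem.Dict.getD idx kw [] ++ [(r.1, gg.1)])) idx) idx)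
    PySem.Dict.empty

def infer_roles_from_skills_py_alt (skills : List String) : List String :=
  let satisfied : PySem.Set (String × Int) :=
    skills.foldl (fun sat skill =>
      PySem.Set.update sat (PySem.Dict.getD pvIndex (PySem.Str.lower skill) [])) PySem.Set.empty
  let roles := (pvRules.filter (fun r =>
      (PySem.List.pyRange 0 r.2.length 1).all
        (fun gid => PySem.Set.contains satisfied (r.1, gid)))).map Prod.fst
  if roles ≠ [] then roles else ["Software Developer"]

-- ===== PRECONDITION & SPEC =====
def Spec_infer_roles_from_skills_py (skills : List String) (out : List String) : Prop := out = infer_roles_from_skills_py_alt skills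
instance (skills : List String) (out : List String) : Decidable (Spec_infer_roles_from_skills_py skills out) := by unfold Spec_infer_roles_from_skills_py; infer_instance

-- ===== CLAIM (what is proved, stated in full; the proofs are below) =====
def Claim_equal_infer_roles_from_skills_py : Prop := ∀ (skills : List String), Dom_infer_roles_from_skills_py skills → Spec_infer_roles_from_skills_py skills (infer_roles_from_skills_py skills)

-- ===== LEMMAS AND PROOFS =====

-- lookup in a literal dict of lists, as a scan over its items (keys distinct)
theorem contains_getD_mk {ν : Type} [BEq ν] (l : List (String × List ν)) (t : String) (p : ν)
    (hnd : (l.map Prod.fst).Nodup) :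
    ((PySem.Dict.mk l).getD t []).contains p = l.any (fun kv => kv.1 == t && kv.2.contains p) := by
  induction l with
  | nil => simp [PySem.Dict.getD, PySem.Dict.get?]
  | cons kv rest ih =>
    obtain ⟨k, v⟩ := kv
    simp only [List.map_cons, List.nodup_cons] at hnd
    simp only [PySem.Dict.getD, PySem.Dict.get?_mk_cons, List.any_cons]
    by_cases h : k = t
    · subst h
      simp only [BEq.rfl, Bool.true_and]
      have hr : rest.any (fun kv' => kv'.1 == k && kv'.2.contains p) = false := by
        simp only [List.any_eq_false]
        intro kv' hmem
        have : kv'.1 ≠ k := fun he => hnd.1 (he ▸ List.mem_map_of_mem hmem)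
        simp [this]
      simp [hr]
    · have hb : (k == t) = false := by simp [h]
      rw [hb, if_neg (by simp [h])]
      simp only [Bool.false_and, Bool.false_or]
      simpa [PySem.Dict.getD] using ih hnd.2

-- the index Source B builds, written out
def pvIndexItems : List (String × List (String × Int)) :=
  [("react", [("Frontend Developer", 0), ("Full Stack Developer", 0)]),
   ("angular", [("Frontend Developer", 0), ("Full Stack Developer", 0)]),
   ("vue.js", [("Frontend Developer", 0)]),
   ("html", [("Frontend Developer", 0)]),
   ("css", [("Frontend Developer", 0)]),
   ("javascript", [("Frontend Developer", 0)]),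
   ("python", [("Backend Developer", 0), ("Full Stack Developer", 1)]),
   ("java", [("Backend Developer", 0), ("Full Stack Developer", 1)]),
   ("node.js", [("Backend Developer", 0), ("Full Stack Developer", 1)]),
   ("sql", [("Backend Developer", 0)]),
   ("postgresql", [("Backend Developer", 0)]),
   ("aws", [("DevOps Engineer", 0)]),
   ("azure", [("DevOps Engineer", 0)]),
   ("docker", [("DevOps Engineer", 0)]),
   ("kubernetes", [("DevOps Engineer", 0)]),
   ("jenkins", [("DevOps Engineer", 0)]),
   ("machine learning", [("Data Scientist", 0)]),
   ("ai", [("Data Scientist", 0)]),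
   ("tensorflow", [("Data Scientist", 0)]),
   ("pytorch", [("Data Scientist", 0)])]

theorem pvIndex_eq : pvIndex = PySem.Dict.mk pvIndexItems := by rfl

-- the (role, gid) pair is hit by exactly the keywords of that group
theorem idx_fe (t : String) :
    (PySem.Dict.getD pvIndex t []).contains ("Frontend Developer", (0:Int))
      = ["react", "angular", "vue.js", "html", "css", "javascript"].contains t := by
  rw [pvIndex_eq, contains_getD_mk _ _ _ (by decide), Bool.eq_iff_iff]
  simp [pvIndexItems]
  tauto

theorem idx_be (t : String) :
    (PySem.Dict.getD pvIndex t []).contains ("Backend Developer", (0:Int))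
      = ["python", "java", "node.js", "sql", "postgresql"].contains t := by
  rw [pvIndex_eq, contains_getD_mk _ _ _ (by decide), Bool.eq_iff_iff]
  simp [pvIndexItems]
  tauto

theorem idx_fs0 (t : String) :
    (PySem.Dict.getD pvIndex t []).contains ("Full Stack Developer", (0:Int))
      = ["react", "angular"].contains t := by
  rw [pvIndex_eq, contains_getD_mk _ _ _ (by decide), Bool.eq_iff_iff]
  simp [pvIndexItems]
  tauto

theorem idx_fs1 (t : String) :
    (PySem.Dict.getD pvIndex t []).contains ("Full Stack Developer", (1:Int))
      = ["python", "java", "node.js"].contains t := by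
  rw [pvIndex_eq, contains_getD_mk _ _ _ (by decide), Bool.eq_iff_iff]
  simp [pvIndexItems]
  tauto

theorem idx_do (t : String) :
    (PySem.Dict.getD pvIndex t []).contains ("DevOps Engineer", (0:Int))
      = ["aws", "azure", "docker", "kubernetes", "jenkins"].contains t := by
  rw [pvIndex_eq, contains_getD_mk _ _ _ (by decide), Bool.eq_iff_iff]
  simp [pvIndexItems]
  tauto

theorem idx_ds (t : String) :
    (PySem.Dict.getD pvIndex t []).contains ("Data Scientist", (0:Int))
      = ["machine learning", "ai", "tensorflow", "pytorch"].contains t := by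
  rw [pvIndex_eq, contains_getD_mk _ _ _ (by decide), Bool.eq_iff_iff]
  simp [pvIndexItems]
  tauto

-- the single pass over the skills hits (role, gid) iff some skill's lowering is indexed to it
theorem contains_fold (skills : List String) (init : PySem.Set (String × Int)) (p : String × Int) :
    List.contains
      (skills.foldl (fun sat skill =>
        PySem.Set.update sat (PySem.Dict.getD pvIndex (PySem.Str.lower skill) [])) init) p
    = (List.contains init p
        || skills.any (fun s => (PySem.Dict.getD pvIndex (PySem.Str.lower s) []).contains p)) := by
  induction skills generalizing init with
  | nil => simp
  | cons s rest ih =>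
    simp only [List.foldl_cons, List.any_cons, ih]
    rw [Bool.eq_iff_iff]
    simp [PySem.Set.mem_update]
    tauto

-- A's keyword-over-skills scan equals B's skill-over-keywords scan
theorem any_contains_map (g : List String) (skills : List String) (f : String → String) :
    g.any (fun kw => (skills.map f).contains kw) = skills.any (fun s => g.contains (f s)) := by
  rw [Bool.eq_iff_iff]
  simp [List.any_eq_true, List.mem_map]
  aesop

-- ===== VERDICT (by name: the statement is the Claim_ definition above) =====
theorem infer_roles_from_skills_py_spec : Claim_equal_infer_roles_from_skills_py := by
  intro skills _
  unfold Spec_infer_roles_from_skills_py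
  have h1 : PySem.List.pyRange 0 ((0 + 1 : Nat) : Int) 1 = [0] := by decide
  have h2 : PySem.List.pyRange 0 ((0 + 1 + 1 : Nat) : Int) 1 = [0, 1] := by decide
  simp only [infer_roles_from_skills_py, infer_roles_from_skills_py_alt, pvRules,
    List.filter_cons, List.filter_nil, List.length_cons, List.length_nil,
    PySem.Set.contains, h1, h2, List.all_cons, List.all_nil, Bool.and_true,
    contains_fold, List.contains_nil, Bool.false_or,
    idx_fe, idx_be, idx_fs0, idx_fs1, idx_do, idx_ds, any_contains_map]
  generalize skills.any (fun s => ["react", "angular", "vue.js", "html", "css", "javascript"].contains (PySem.Str.lower s)) = c1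
  generalize skills.any (fun s => ["python", "java", "node.js", "sql", "postgresql"].contains (PySem.Str.lower s)) = c2
  generalize skills.any (fun s => ["react", "angular"].contains (PySem.Str.lower s)) = c3
  generalize skills.any (fun s => ["python", "java", "node.js"].contains (PySem.Str.lower s)) = c4
  generalize skills.any (fun s => ["aws", "azure", "docker", "kubernetes", "jenkins"].contains (PySem.Str.lower s)) = c5
  generalize skills.any (fun s => ["machine learning", "ai", "tensorflow", "pytorch"].contains (PySem.Str.lower s)) = c6
  cases c1 <;> cases c2 <;> cases c3 <;> cases c4 <;> cases c5 <;> cases c6 <;> decide
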